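-- pv_equiv track=rewrite | github.com/grapheneaffiliate/h4-polytopic-attention | solve_batch20.py | solve_d13f3404
-- ===== SOURCE A (Python) =====
-- def solve_d13f3404(grid):
--     h, w = len(grid), len(grid[0])
--     oh, ow = h*2, w*2
--     out = [[0]*ow for _ in range(oh)]
--     for d in range(oh):
--         for r in range(h):
--             for c in range(w):
--                 nr, nc = r + d, c + d
--                 if 0 <= nr < oh and 0 <= nc < ow and grid[r][c] != 0:
--                     out[nr][nc] = grid[r][c]
--     return out
-- ===== SOURCE B (Python) =====
-- def solve_d13f3404(grid):
--     h, w = len(grid), len(grid[0])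
--     # For each diagonal k = r - c, remember the topmost (smallest-r) nonzero cell:
--     # in A, larger shifts d overwrite smaller ones, and d = nr - r, so the smallest
--     # eligible r wins at every output cell.
--     best = {}
--     for r in range(h):
--         for c in range(w):
--             v = grid[r][c]
--             if v != 0 and (r - c) not in best:
--                 best[r - c] = (r, v)
--     oh, ow = h * 2, w * 2
--     return [[best[nr - nc][1]
--              if (nr - nc) in best and best[nr - nc][0] <= nr else 0
--              for nc in range(ow)]
--             for nr in range(oh)]
-- ===== Notes on version B (the rewrite author's own statement) =====
-- stated objective: faster
-- what changed: Replaces the triple loop (every shift d re-scans the whole grid, later shifts overwriting earlier ones) by a single scan that records, per diagonal r-c, the topmost nonzero cell (the one that wins all overwrites) and then fills each output cell directly from that table.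
import Mathlib
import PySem

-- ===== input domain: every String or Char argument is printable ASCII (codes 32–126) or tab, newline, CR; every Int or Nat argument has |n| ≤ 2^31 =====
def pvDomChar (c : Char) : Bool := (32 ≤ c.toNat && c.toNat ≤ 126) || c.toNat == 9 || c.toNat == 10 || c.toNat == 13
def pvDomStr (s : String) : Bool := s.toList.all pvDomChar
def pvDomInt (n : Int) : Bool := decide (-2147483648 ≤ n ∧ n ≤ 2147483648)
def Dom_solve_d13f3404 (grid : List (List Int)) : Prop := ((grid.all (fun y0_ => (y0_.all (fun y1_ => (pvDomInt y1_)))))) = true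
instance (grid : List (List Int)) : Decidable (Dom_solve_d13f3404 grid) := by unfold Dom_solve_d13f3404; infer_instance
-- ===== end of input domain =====

-- B replaces A's O(h^2*w) triple shift loop by one pass recording, per diagonal, the
-- topmost nonzero cell (the one that wins all overwrites), then fills the output directly.

-- ===== PORT A =====
-- out[nr][nc] = v  (both indices in range whenever A writes)
def pvSet2 (out : List (List Int)) (nr nc : Nat) (v : Int) : List (List Int) :=
  out.set nr ((out.getD nr []).set nc v)

def solve_d13f3404 (grid : List (List Int)) : List (List Int) :=
  let h := grid.length
  let w := grid.headI.length
  let oh := h * 2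
  let ow := w * 2
  (List.range oh).foldl (fun out d =>
    (List.range h).foldl (fun out r =>
      (List.range w).foldl (fun out c =>
        -- grid[r][c]; exact inside Pre_ (r < h, c < w ≤ row length)
        let v := (grid.getD r []).getD c 0
        if r + d < oh ∧ c + d < ow ∧ v ≠ 0 then pvSet2 out (r + d) (c + d) v else out)
        out)
      out)
    (List.replicate oh (List.replicate ow (0 : Int)))

-- ===== PORT B =====
-- best : diagonal k = r - c ↦ (r, grid[r][c]) for the smallest r with a nonzero cell
def pvBest (grid : List (List Int)) : PySem.Dict Int (Int × Int) :=
  (List.range grid.length).foldl (fun best r =>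
    (List.range grid.headI.length).foldl (fun best c =>
      let v := (grid.getD r []).getD c 0
      if v ≠ 0 ∧ best.contains ((r : Int) - (c : Int)) = false
      then best.insert ((r : Int) - (c : Int)) ((r : Int), v) else best)
      best)
    PySem.Dict.empty

def solve_d13f3404_alt (grid : List (List Int)) : List (List Int) :=
  let h := grid.length
  let w := grid.headI.length
  let best := pvBest grid
  (List.range (h * 2)).map (fun (nr : Nat) =>
    (List.range (w * 2)).map (fun (nc : Nat) =>
      (best.get? ((nr : Int) - (nc : Int))).elim 0
        (fun p => if p.1 ≤ (nr : Int) then p.2 else 0)))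

-- ===== PRECONDITION & SPEC =====
-- Pre_ excludes exactly the inputs on which Python A raises IndexError:
-- the empty grid (grid[0]) and grids with a row shorter than the first row.
def Pre_solve_d13f3404 (grid : List (List Int)) : Prop :=
  grid ≠ [] ∧ ∀ row ∈ grid, grid.headI.length ≤ row.length
instance (grid : List (List Int)) : Decidable (Pre_solve_d13f3404 grid) := by
  unfold Pre_solve_d13f3404; infer_instance
def pvWitness_solve_d13f3404 : List (List Int) := [[1, 0], [0, 2]]

def Spec_solve_d13f3404 (grid : List (List Int)) (out : List (List Int)) : Prop := out = solve_d13f3404_alt grid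
instance (grid : List (List Int)) (out : List (List Int)) : Decidable (Spec_solve_d13f3404 grid out) := by unfold Spec_solve_d13f3404; infer_instance

-- ===== CLAIM (what is proved, stated in full; the proofs are below) =====
def Claim_equal_solve_d13f3404 : Prop := ∀ (grid : List (List Int)), Dom_solve_d13f3404 grid → Pre_solve_d13f3404 grid → Spec_solve_d13f3404 grid (solve_d13f3404 grid)

-- ===== LEMMAS AND PROOFS =====
def readO (out : List (List Int)) (i j : Nat) : Int := (out.getD i []).getD j 0

def gOf (grid : List (List Int)) (r c : Nat) : Int := (grid.getD r []).getD c 0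

def Dims (oh ow : Nat) (out : List (List Int)) : Prop :=
  out.length = oh ∧ ∀ i, (out.getD i []).length = if i < oh then ow else 0

theorem dims_init (oh ow : Nat) : Dims oh ow (List.replicate oh (List.replicate ow (0 : Int))) := by
  refine ⟨by simp, fun i => ?_⟩
  by_cases h : i < oh <;> simp [List.getD, List.getElem?_replicate, h]

theorem dims_pvSet2 (oh ow : Nat) (out : List (List Int)) (nr nc : Nat) (v : Int)
    (hd : Dims oh ow out) : Dims oh ow (pvSet2 out nr nc v) := by
  obtain ⟨h1, h2⟩ := hd
  refine ⟨by simp [pvSet2, h1], fun i => ?_⟩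
  simp only [pvSet2, List.getD]
  by_cases hi : i = nr
  · subst hi
    by_cases hlt : i < out.length
    · rw [List.getElem?_set_self hlt]
      simp only [Option.getD_some, List.length_set]
      have := h2 i
      simp only [List.getD] at this
      exact this
    · rw [List.getElem?_eq_none (by simp; omega)]
      simp [show ¬ i < oh by omega]
  · rw [List.getElem?_set_ne (fun h => hi h.symm)]
    have := h2 i
    simp only [List.getD] at this
    exact this

theorem readO_pvSet2 (out : List (List Int)) (nr nc : Nat) (v : Int) (i j : Nat)
    (hnr : nr < out.length) (hnc : nc < (out.getD nr []).length) :
    readO (pvSet2 out nr nc v) i j = if i = nr ∧ j = nc then v else readO out i j := by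
  simp only [readO, pvSet2, List.getD]
  by_cases hi : i = nr
  · subst hi
    rw [List.getElem?_set_self hnr]
    simp only [Option.getD_some]
    simp only [List.getD] at hnc
    by_cases hj : j = nc
    · subst hj
      rw [List.getElem?_set_self hnc]
      simp
    · rw [List.getElem?_set_ne (fun h => hj h.symm)]
      simp [hj]
  · rw [List.getElem?_set_ne (fun h => hi h.symm)]
    simp [hi]

theorem readO_init (oh ow i j : Nat) :
    readO (List.replicate oh (List.replicate ow (0 : Int))) i j = 0 := by
  by_cases h : i < oh <;> by_cases h2 : j < ow <;>
    simp [readO, List.getD, List.getElem?_replicate, h, h2]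

def loopC (g : Nat → Nat → Int) (oh ow d r n : Nat) (out : List (List Int)) : List (List Int) :=
  (List.range n).foldl (fun out c =>
    if r + d < oh ∧ c + d < ow ∧ g r c ≠ 0 then pvSet2 out (r + d) (c + d) (g r c) else out) out

theorem loopC_succ (g : Nat → Nat → Int) (oh ow d r n : Nat) (out : List (List Int)) :
    loopC g oh ow d r (n + 1) out =
      (if r + d < oh ∧ n + d < ow ∧ g r n ≠ 0
       then pvSet2 (loopC g oh ow d r n out) (r + d) (n + d) (g r n)
       else loopC g oh ow d r n out) := by
  rw [loopC, List.range_succ, List.foldl_append]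
  rfl

theorem loopC_spec (g : Nat → Nat → Int) (oh ow d r n : Nat) (out : List (List Int))
    (hd : Dims oh ow out) (i j : Nat) :
    Dims oh ow (loopC g oh ow d r n out) ∧
    readO (loopC g oh ow d r n out) i j =
      if i = r + d ∧ i < oh ∧ d ≤ j ∧ j - d < n ∧ j < ow ∧ g r (j - d) ≠ 0
      then g r (j - d) else readO out i j := by
  induction n with
  | zero =>
    refine ⟨by simpa [loopC] using hd, ?_⟩
    simp [loopC]
  | succ n ih =>
    obtain ⟨ihd, ihr⟩ := ih
    rw [loopC_succ]
    by_cases hc : r + d < oh ∧ n + d < ow ∧ g r n ≠ 0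
    · rw [if_pos hc]
      refine ⟨dims_pvSet2 _ _ _ _ _ _ ihd, ?_⟩
      rw [readO_pvSet2 _ _ _ _ i j (by rw [ihd.1]; exact hc.1) (by rw [ihd.2 (r + d), if_pos hc.1]; omega)]
      · rw [ihr]
        by_cases h1 : i = r + d ∧ j = n + d
        · rw [if_pos h1]
          have hjd : j - d = n := by omega
          rw [if_pos ⟨h1.1, by omega, by omega, by omega, by omega, by rw [hjd]; exact hc.2.2⟩, hjd]
        · rw [if_neg h1]
          by_cases h2 : i = r + d ∧ i < oh ∧ d ≤ j ∧ j - d < n ∧ j < ow ∧ g r (j - d) ≠ 0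
          · rw [if_pos h2, if_pos ⟨h2.1, h2.2.1, h2.2.2.1, by omega, h2.2.2.2.2⟩]
          · rw [if_neg h2, if_neg ?_]
            intro h3
            obtain ⟨e1, e2, e3, e4, e5, e6⟩ := h3
            by_cases hjn : j - d = n
            · exact h1 ⟨e1, by omega⟩
            · exact h2 ⟨e1, e2, e3, by omega, e5, e6⟩
    · rw [if_neg hc]
      refine ⟨ihd, ?_⟩
      rw [ihr]
      by_cases h2 : i = r + d ∧ i < oh ∧ d ≤ j ∧ j - d < n ∧ j < ow ∧ g r (j - d) ≠ 0
      · rw [if_pos h2, if_pos ⟨h2.1, h2.2.1, h2.2.2.1, by omega, h2.2.2.2.2⟩]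
      · rw [if_neg h2, if_neg ?_]
        intro h3
        obtain ⟨e1, e2, e3, e4, e5, e6⟩ := h3
        by_cases hjn : j - d = n
        · refine hc ⟨by omega, by omega, ?_⟩
          rw [← hjn]; exact e6
        · exact h2 ⟨e1, e2, e3, by omega, e5, e6⟩

def loopR (g : Nat → Nat → Int) (oh ow w d m : Nat) (out : List (List Int)) : List (List Int) :=
  (List.range m).foldl (fun out r => loopC g oh ow d r w out) out

theorem loopR_succ (g : Nat → Nat → Int) (oh ow w d m : Nat) (out : List (List Int)) :
    loopR g oh ow w d (m + 1) out = loopC g oh ow d m w (loopR g oh ow w d m out) := by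
  rw [loopR, List.range_succ, List.foldl_append]
  rfl

theorem loopR_spec (g : Nat → Nat → Int) (oh ow w d m : Nat) (out : List (List Int))
    (hd : Dims oh ow out) (i j : Nat) :
    Dims oh ow (loopR g oh ow w d m out) ∧
    readO (loopR g oh ow w d m out) i j =
      if d ≤ i ∧ i - d < m ∧ i < oh ∧ d ≤ j ∧ j - d < w ∧ j < ow ∧ g (i - d) (j - d) ≠ 0
      then g (i - d) (j - d) else readO out i j := by
  induction m with
  | zero =>
    refine ⟨by simpa [loopR] using hd, ?_⟩
    simp [loopR]
  | succ m ih =>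
    obtain ⟨ihd, ihr⟩ := ih
    rw [loopR_succ]
    obtain ⟨cd, cr⟩ := loopC_spec g oh ow d m w _ ihd i j
    refine ⟨cd, ?_⟩
    rw [cr, ihr]
    by_cases h1 : i = m + d ∧ i < oh ∧ d ≤ j ∧ j - d < w ∧ j < ow ∧ g m (j - d) ≠ 0
    · rw [if_pos h1]
      have him : i - d = m := by omega
      rw [if_pos ⟨by omega, by omega, h1.2.1, h1.2.2.1, h1.2.2.2.1, h1.2.2.2.2.1,
        by rw [him]; exact h1.2.2.2.2.2⟩, him]
    · rw [if_neg h1]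
      by_cases h2 : d ≤ i ∧ i - d < m ∧ i < oh ∧ d ≤ j ∧ j - d < w ∧ j < ow ∧ g (i - d) (j - d) ≠ 0
      · rw [if_pos h2, if_pos ⟨h2.1, by omega, h2.2.2.1, h2.2.2.2.1, h2.2.2.2.2.1,
          h2.2.2.2.2.2.1, h2.2.2.2.2.2.2⟩]
      · rw [if_neg h2, if_neg ?_]
        intro h3
        obtain ⟨e1, e2, e3, e4, e5, e6, e7⟩ := h3
        by_cases him : i - d = m
        · refine h1 ⟨by omega, e3, e4, e5, e6, ?_⟩
          rw [← him]; exact e7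
        · exact h2 ⟨e1, by omega, e3, e4, e5, e6, e7⟩

def lastShift (g : Nat → Nat → Int) (h w i j : Nat) : Nat → Option Nat
  | 0 => none
  | N + 1 =>
    if N ≤ i ∧ i - N < h ∧ N ≤ j ∧ j - N < w ∧ g (i - N) (j - N) ≠ 0 then some N
    else lastShift g h w i j N

def loopD (g : Nat → Nat → Int) (h w oh ow N : Nat) (out : List (List Int)) : List (List Int) :=
  (List.range N).foldl (fun out d => loopR g oh ow w d h out) out

theorem loopD_succ (g : Nat → Nat → Int) (h w oh ow N : Nat) (out : List (List Int)) :
    loopD g h w oh ow (N + 1) out = loopR g oh ow w N h (loopD g h w oh ow N out) := by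
  rw [loopD, List.range_succ, List.foldl_append]
  rfl

theorem loopD_spec (g : Nat → Nat → Int) (h w oh ow N : Nat) (out : List (List Int))
    (hd : Dims oh ow out) (i j : Nat) (hi : i < oh) (hj : j < ow) :
    Dims oh ow (loopD g h w oh ow N out) ∧
    readO (loopD g h w oh ow N out) i j =
      (lastShift g h w i j N).elim (readO out i j) (fun d => g (i - d) (j - d)) := by
  induction N with
  | zero =>
    refine ⟨by simpa [loopD] using hd, ?_⟩
    simp [loopD, lastShift, Option.elim]
  | succ N ih =>
    obtain ⟨ihd, ihr⟩ := ih
    rw [loopD_succ]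
    obtain ⟨rd, rr⟩ := loopR_spec g oh ow w N h _ ihd i j
    refine ⟨rd, ?_⟩
    rw [rr, ihr, lastShift]
    by_cases h1 : N ≤ i ∧ i - N < h ∧ N ≤ j ∧ j - N < w ∧ g (i - N) (j - N) ≠ 0
    · rw [if_pos ⟨h1.1, h1.2.1, hi, h1.2.2.1, h1.2.2.2.1, hj, h1.2.2.2.2⟩, if_pos h1]
      simp [Option.elim]
    · rw [if_neg ?_, if_neg h1]
      intro h2
      exact h1 ⟨h2.1, h2.2.1, h2.2.2.2.1, h2.2.2.2.2.1, h2.2.2.2.2.2.2⟩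


def loopBC (g : Nat → Nat → Int) (r n : Nat) (D : PySem.Dict Int (Int × Int)) : PySem.Dict Int (Int × Int) :=
  (List.range n).foldl (fun best c =>
    if g r c ≠ 0 ∧ best.contains ((r : Int) - (c : Int)) = false
    then best.insert ((r : Int) - (c : Int)) ((r : Int), g r c) else best) D

theorem loopBC_succ (g : Nat → Nat → Int) (r n : Nat) (D : PySem.Dict Int (Int × Int)) :
    loopBC g r (n + 1) D =
      (if g r n ≠ 0 ∧ (loopBC g r n D).contains ((r : Int) - (n : Int)) = false
       then (loopBC g r n D).insert ((r : Int) - (n : Int)) ((r : Int), g r n)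
       else loopBC g r n D) := by
  rw [loopBC, List.range_succ, List.foldl_append]
  rfl

theorem loopBC_get? (g : Nat → Nat → Int) (r n : Nat) (D : PySem.Dict Int (Int × Int)) (k : Int) :
    (loopBC g r n D).get? k =
      match D.get? k with
      | some p => some p
      | none =>
        if k ≤ (r : Int) ∧ (r : Int) - k < (n : Int) ∧ g r ((r : Int) - k).toNat ≠ 0
        then some ((r : Int), g r ((r : Int) - k).toNat) else none := by
  induction n with
  | zero =>
    simp only [loopBC, List.range_zero, List.foldl_nil]
    cases hD : D.get? k with
    | some p => rfl
    | none =>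
      rw [if_neg (by push_cast; omega)]
  | succ n ih =>
    rw [loopBC_succ]
    by_cases hg : g r n ≠ 0
    · by_cases hcon : (loopBC g r n D).contains ((r : Int) - (n : Int)) = false
      · rw [if_pos ⟨hg, hcon⟩, PySem.Dict.get?_insert]
        have hnone : (loopBC g r n D).get? ((r : Int) - (n : Int)) = none := by
          rwa [← PySem.Dict.get?_eq_none_iff_contains] at hcon
        by_cases hk : k = (r : Int) - (n : Int)
        · subst hk
          rw [if_pos rfl]
          rw [ih] at hnone
          cases hD : D.get? ((r : Int) - (n : Int)) with
          | some p => rw [hD] at hnone; exact absurd hnone (by simp)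
          | none =>
            have htn : ((r : Int) - ((r : Int) - (n : Int))).toNat = n := by omega
            rw [if_pos ⟨by omega, by omega, by rw [htn]; exact hg⟩, htn]
        · rw [if_neg hk, ih]
          cases hD : D.get? k with
          | some p => rfl
          | none =>
            by_cases hcnd : k ≤ (r : Int) ∧ (r : Int) - k < (n : Int) ∧ g r ((r : Int) - k).toNat ≠ 0
            · rw [if_pos hcnd, if_pos ⟨hcnd.1, by omega, hcnd.2.2⟩]
            · rw [if_neg hcnd, if_neg ?_]
              intro h3
              refine hcnd ⟨h3.1, ⟨?_, h3.2.2⟩⟩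
              rcases lt_or_eq_of_le (by omega : (r : Int) - k ≤ (n : Int)) with h | h
              · exact h
              · exact absurd (by omega : k = (r : Int) - (n : Int)) hk
      · rw [if_neg (by tauto), ih]
        have hsome : (loopBC g r n D).get? ((r : Int) - (n : Int)) ≠ none := by
          intro hnone
          rw [PySem.Dict.get?_eq_none_iff_contains] at hnone
          exact hcon hnone
        cases hD : D.get? k with
        | some p => rfl
        | none =>
          by_cases hk : k = (r : Int) - (n : Int)
          · -- the entry for k is already present, so both sides keep the old answer;
            -- but D.get? k = none, so the presence comes from the row condition with bound n
            subst hk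
            rw [ih, hD] at hsome
            by_cases hcnd : (r : Int) - (n : Int) ≤ (r : Int) ∧ (r : Int) - ((r : Int) - (n : Int)) < (n : Int) ∧ g r ((r : Int) - ((r : Int) - (n : Int))).toNat ≠ 0
            · rw [if_pos hcnd, if_pos ⟨hcnd.1, by omega, hcnd.2.2⟩]
            · rw [if_neg hcnd] at hsome
              exact absurd rfl hsome
          · by_cases hcnd : k ≤ (r : Int) ∧ (r : Int) - k < (n : Int) ∧ g r ((r : Int) - k).toNat ≠ 0
            · rw [if_pos hcnd, if_pos ⟨hcnd.1, by omega, hcnd.2.2⟩]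
            · rw [if_neg hcnd, if_neg ?_]
              intro h3
              refine hcnd ⟨h3.1, ⟨?_, h3.2.2⟩⟩
              rcases lt_or_eq_of_le (by omega : (r : Int) - k ≤ (n : Int)) with h | h
              · exact h
              · exact absurd (by omega : k = (r : Int) - (n : Int)) hk
    · rw [if_neg (by tauto), ih]
      cases hD : D.get? k with
      | some p => rfl
      | none =>
        by_cases hcnd : k ≤ (r : Int) ∧ (r : Int) - k < (n : Int) ∧ g r ((r : Int) - k).toNat ≠ 0
        · rw [if_pos hcnd, if_pos ⟨hcnd.1, by omega, hcnd.2.2⟩]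
        · rw [if_neg hcnd, if_neg ?_]
          intro h3
          refine hcnd ⟨h3.1, ⟨?_, h3.2.2⟩⟩
          rcases lt_or_eq_of_le (by omega : (r : Int) - k ≤ (n : Int)) with h | h
          · exact h
          · exfalso
            apply hg
            have : ((r : Int) - k).toNat = n := by omega
            rw [← this]
            exact h3.2.2

def loopBR (g : Nat → Nat → Int) (w m : Nat) (D : PySem.Dict Int (Int × Int)) : PySem.Dict Int (Int × Int) :=
  (List.range m).foldl (fun best r => loopBC g r w best) D

theorem loopBR_succ (g : Nat → Nat → Int) (w m : Nat) (D : PySem.Dict Int (Int × Int)) :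
    loopBR g w (m + 1) D = loopBC g m w (loopBR g w m D) := by
  rw [loopBR, List.range_succ, List.foldl_append]
  rfl

def firstHit (g : Nat → Nat → Int) (w : Nat) (k : Int) : Nat → Option (Nat × Int)
  | 0 => none
  | m + 1 =>
    match firstHit g w k m with
    | some p => some p
    | none =>
      if k ≤ (m : Int) ∧ (m : Int) - k < (w : Int) ∧ g m ((m : Int) - k).toNat ≠ 0
      then some (m, g m ((m : Int) - k).toNat) else none

theorem loopBR_get? (g : Nat → Nat → Int) (w m : Nat) (k : Int) :
    (loopBR g w m PySem.Dict.empty).get? k =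
      (firstHit g w k m).map (fun p => ((p.1 : Int), p.2)) := by
  induction m with
  | zero => simp [loopBR, firstHit, PySem.Dict.get?_empty]
  | succ m ih =>
    rw [loopBR_succ, loopBC_get? g m w _ k, ih, firstHit]
    cases hf : firstHit g w k m with
    | some p => rfl
    | none =>
      show _ = Option.map _ (match (none : Option (Nat × Int)) with
        | some p => some p
        | none => _)
      simp only [Option.map_none]
      split_ifs with hC <;> simp

def Cdiag (g : Nat → Nat → Int) (w : Nat) (k : Int) (r : Nat) : Prop :=
  k ≤ (r : Int) ∧ (r : Int) - k < (w : Int) ∧ g r ((r : Int) - k).toNat ≠ 0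

theorem firstHit_none_iff (g : Nat → Nat → Int) (w : Nat) (k : Int) (m : Nat) :
    firstHit g w k m = none ↔ ∀ r < m, ¬ Cdiag g w k r := by
  induction m with
  | zero => simp [firstHit]
  | succ m ih =>
    rw [firstHit]
    cases hf : firstHit g w k m with
    | some p =>
      simp only [reduceCtorEq, false_iff]
      intro hall
      have : firstHit g w k m = none := ih.mpr (fun r hr => hall r (by omega))
      rw [hf] at this
      exact absurd this (by simp)
    | none =>
      have hall := ih.mp hf
      by_cases hC : k ≤ (m : Int) ∧ (m : Int) - k < (w : Int) ∧ g m ((m : Int) - k).toNat ≠ 0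
      · rw [if_pos hC]
        simp only [reduceCtorEq, false_iff]
        intro hall2
        exact hall2 m (by omega) hC
      · rw [if_neg hC]
        simp only [true_iff]
        intro r hr
        by_cases hrm : r = m
        · subst hrm; exact hC
        · exact hall r (by omega)

theorem firstHit_some_iff (g : Nat → Nat → Int) (w : Nat) (k : Int) (m : Nat) (r : Nat) (v : Int) :
    firstHit g w k m = some (r, v) ↔
      r < m ∧ Cdiag g w k r ∧ v = g r ((r : Int) - k).toNat ∧ ∀ r' < r, ¬ Cdiag g w k r' := by
  induction m generalizing r v with
  | zero => simp [firstHit]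
  | succ m ih =>
    rw [firstHit]
    cases hf : firstHit g w k m with
    | some p =>
      obtain ⟨r₀, v₀⟩ := p
      have hiff := (ih r₀ v₀).mp hf
      constructor
      · intro he
        have e1 : r₀ = r := congrArg Prod.fst (Option.some.inj he)
        have e2 : v₀ = v := congrArg Prod.snd (Option.some.inj he)
        subst e1; subst e2
        exact ⟨by omega, hiff.2.1, hiff.2.2.1, hiff.2.2.2⟩
      · rintro ⟨h1, h2, h3, h4⟩
        have hrr : r₀ = r := by
          by_cases hlt : r₀ < r
          · exact absurd hiff.2.1 (h4 r₀ hlt)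
          · by_cases hgt : r < r₀
            · exact absurd h2 (hiff.2.2.2 r hgt)
            · omega
        subst hrr
        rw [hiff.2.2.1, h3]
    | none =>
      have hall := (firstHit_none_iff g w k m).mp hf
      by_cases hC : k ≤ (m : Int) ∧ (m : Int) - k < (w : Int) ∧ g m ((m : Int) - k).toNat ≠ 0
      · rw [if_pos hC]
        constructor
        · intro he
          have e1 : m = r := congrArg Prod.fst (Option.some.inj he)
          have e2 : g m ((m : Int) - k).toNat = v := congrArg Prod.snd (Option.some.inj he)
          subst e1
          exact ⟨by omega, hC, e2.symm, fun r' hr' => hall r' hr'⟩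
        · rintro ⟨h1, h2, h3, h4⟩
          have hrm : r = m := by
            by_cases hlt : r < m
            · exact absurd h2 (hall r hlt)
            · omega
          subst hrm
          rw [h3]
      · rw [if_neg hC]
        simp only [reduceCtorEq, false_iff]
        rintro ⟨h1, h2, h3, h4⟩
        by_cases hrm : r = m
        · subst hrm; exact hC h2
        · exact hall r (by omega) h2

theorem lastShift_none_iff (g : Nat → Nat → Int) (h w i j : Nat) (N : Nat) :
    lastShift g h w i j N = none ↔
      ∀ d < N, ¬ (d ≤ i ∧ i - d < h ∧ d ≤ j ∧ j - d < w ∧ g (i - d) (j - d) ≠ 0) := by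
  induction N with
  | zero => simp [lastShift]
  | succ N ih =>
    rw [lastShift]
    by_cases hC : N ≤ i ∧ i - N < h ∧ N ≤ j ∧ j - N < w ∧ g (i - N) (j - N) ≠ 0
    · rw [if_pos hC]
      simp only [reduceCtorEq, false_iff]
      intro hall
      exact hall N (by omega) hC
    · rw [if_neg hC, ih]
      constructor
      · intro hall d hd
        by_cases hdN : d = N
        · subst hdN; exact hC
        · exact hall d (by omega)
      · intro hall d hd
        exact hall d (by omega)

theorem lastShift_some_iff (g : Nat → Nat → Int) (h w i j : Nat) (N d : Nat) :
    lastShift g h w i j N = some d ↔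
      d < N ∧ (d ≤ i ∧ i - d < h ∧ d ≤ j ∧ j - d < w ∧ g (i - d) (j - d) ≠ 0) ∧
      ∀ d', d < d' → d' < N →
        ¬ (d' ≤ i ∧ i - d' < h ∧ d' ≤ j ∧ j - d' < w ∧ g (i - d') (j - d') ≠ 0) := by
  induction N with
  | zero => simp [lastShift]
  | succ N ih =>
    rw [lastShift]
    by_cases hC : N ≤ i ∧ i - N < h ∧ N ≤ j ∧ j - N < w ∧ g (i - N) (j - N) ≠ 0
    · rw [if_pos hC]
      constructor
      · intro he
        have : N = d := Option.some.inj he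
        subst this
        exact ⟨by omega, hC, fun d' h1 h2 => by omega⟩
      · rintro ⟨h1, h2, h3⟩
        by_cases hdN : d = N
        · rw [hdN]
        · exact absurd hC (h3 N (by omega) (by omega))
    · rw [if_neg hC, ih]
      constructor
      · rintro ⟨h1, h2, h3⟩
        refine ⟨by omega, h2, fun d' hd1 hd2 => ?_⟩
        by_cases hdN : d' = N
        · subst hdN; exact hC
        · exact h3 d' hd1 (by omega)
      · rintro ⟨h1, h2, h3⟩
        have hdN : d ≠ N := by rintro rfl; exact hC h2
        exact ⟨by omega, h2, fun d' hd1 hd2 => h3 d' hd1 (by omega)⟩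

-- the cell-level bridge
theorem cell_bridge (g : Nat → Nat → Int) (h w i j : Nat) (hi : i < h * 2) (hj : j < w * 2) :
    (lastShift g h w i j (h * 2)).elim 0 (fun d => g (i - d) (j - d)) =
    ((firstHit g w ((i : Int) - (j : Int)) h).map (fun p => ((p.1 : Int), p.2))).elim 0
      (fun p => if p.1 ≤ (i : Int) then p.2 else 0) := by
  cases hf : firstHit g w ((i : Int) - (j : Int)) h with
  | none =>
    have hall := (firstHit_none_iff g w _ h).mp hf
    have : lastShift g h w i j (h * 2) = none := by
      rw [lastShift_none_iff]
      intro d hd hP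
      obtain ⟨p1, p2, p3, p4, p5⟩ := hP
      refine hall (i - d) p2 ⟨by omega, by omega, ?_⟩
      have : ((i - d : Nat) : Int) - ((i : Int) - (j : Int)) = ((j - d : Nat) : Int) := by omega
      rw [this]
      simpa using p5
    rw [this]
    simp
  | some p =>
    obtain ⟨r, v⟩ := p
    have hit := (firstHit_some_iff g w _ h r v).mp hf
    obtain ⟨hr, ⟨c1, c2, c3⟩, hv, hmin⟩ := hit
    by_cases hri : r ≤ i
    · have : lastShift g h w i j (h * 2) = some (i - r) := by
        rw [lastShift_some_iff]
        refine ⟨by omega, ⟨by omega, by omega, by omega, by omega, ?_⟩, ?_⟩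
        · have e1 : i - (i - r) = r := by omega
          have e2 : ((j - (i - r) : Nat) : Int) = ((r : Int) - ((i : Int) - (j : Int))) := by omega
          rw [e1, show j - (i - r) = (((r : Int) - ((i : Int) - (j : Int))).toNat) from by omega]
          exact c3
        · intro d' hd1 hd2 hP
          obtain ⟨p1, p2, p3, p4, p5⟩ := hP
          refine hmin (i - d') (by omega) ⟨by omega, by omega, ?_⟩
          rw [show ((((i - d' : Nat) : Int) - ((i : Int) - (j : Int))).toNat) = j - d' from by omega]
          exact p5
      rw [this, Option.map_some]
      simp only [Option.elim]
      rw [if_pos (by exact_mod_cast hri)]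
      rw [hv, show i - (i - r) = r from by omega,
        show j - (i - r) = (((r : Int) - ((i : Int) - (j : Int))).toNat) from by omega]
    · have : lastShift g h w i j (h * 2) = none := by
        rw [lastShift_none_iff]
        intro d hd hP
        obtain ⟨p1, p2, p3, p4, p5⟩ := hP
        refine hmin (i - d) (by omega) ⟨by omega, by omega, ?_⟩
        rw [show ((((i - d : Nat) : Int) - ((i : Int) - (j : Int))).toNat) = j - d from by omega]
        exact p5
      rw [this, Option.map_some]
      simp only [Option.elim]
      rw [if_neg (by omega)]


theorem dims_loopD (g : Nat → Nat → Int) (h w oh ow N : Nat) (out : List (List Int))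
    (hd : Dims oh ow out) : Dims oh ow (loopD g h w oh ow N out) := by
  induction N with
  | zero => simpa [loopD] using hd
  | succ N ih =>
    rw [loopD_succ]
    exact (loopR_spec g oh ow w N h _ ih 0 0).1

theorem solveA_eq_loopD (grid : List (List Int)) :
    solve_d13f3404 grid = loopD (gOf grid) grid.length grid.headI.length
      (grid.length * 2) (grid.headI.length * 2) (grid.length * 2)
      (List.replicate (grid.length * 2) (List.replicate (grid.headI.length * 2) (0 : Int))) := rfl

theorem pvBest_eq_loopBR (grid : List (List Int)) :
    pvBest grid = loopBR (gOf grid) grid.headI.length grid.length PySem.Dict.empty := rfl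

theorem solve_eq_alt (grid : List (List Int)) : solve_d13f3404 grid = solve_d13f3404_alt grid := by
  have hdims : Dims (grid.length * 2) (grid.headI.length * 2)
      (loopD (gOf grid) grid.length grid.headI.length (grid.length * 2) (grid.headI.length * 2)
        (grid.length * 2)
        (List.replicate (grid.length * 2) (List.replicate (grid.headI.length * 2) (0 : Int)))) :=
    dims_loopD _ _ _ _ _ _ _ (dims_init _ _)
  rw [solveA_eq_loopD]
  show _ = (List.range (grid.length * 2)).map (fun (nr : Nat) =>
    (List.range (grid.headI.length * 2)).map (fun (nc : Nat) =>
      ((pvBest grid).get? ((nr : Int) - (nc : Int))).elim 0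
        (fun p => if p.1 ≤ (nr : Int) then p.2 else 0)))
  apply List.ext_getElem
  · rw [hdims.1]; simp
  · intro i hi1 hi2
    have hioh : i < grid.length * 2 := by rwa [hdims.1] at hi1
    rw [List.getElem_map, List.getElem_range]
    apply List.ext_getElem
    · have hrow := hdims.2 i
      rw [List.getD_eq_getElem _ [] hi1, if_pos hioh] at hrow
      rw [hrow]
      simp
    · intro j hj1 hj2
      have hjow : j < grid.headI.length * 2 := by
        have hrow := hdims.2 i
        rw [List.getD_eq_getElem _ [] hi1, if_pos hioh] at hrow
        rwa [hrow] at hj1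
      have hread :
          (loopD (gOf grid) grid.length grid.headI.length (grid.length * 2)
            (grid.headI.length * 2) (grid.length * 2)
            (List.replicate (grid.length * 2)
              (List.replicate (grid.headI.length * 2) (0 : Int))))[i][j] =
          readO (loopD (gOf grid) grid.length grid.headI.length (grid.length * 2)
            (grid.headI.length * 2) (grid.length * 2)
            (List.replicate (grid.length * 2)
              (List.replicate (grid.headI.length * 2) (0 : Int)))) i j := by
        rw [readO, List.getD_eq_getElem _ [] hi1, List.getD_eq_getElem _ 0 hj1]
      rw [hread,
        (loopD_spec (gOf grid) grid.length grid.headI.length (grid.length * 2)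
          (grid.headI.length * 2) (grid.length * 2) _ (dims_init _ _) i j hioh hjow).2]
      have init0 : readO (List.replicate (grid.length * 2)
          (List.replicate (grid.headI.length * 2) (0 : Int))) i j = 0 := readO_init _ _ _ _
      rw [List.getElem_map, List.getElem_range, pvBest_eq_loopBR, loopBR_get?]
      rw [init0]
      exact cell_bridge (gOf grid) grid.length grid.headI.length i j hioh hjow

-- ===== VERDICT (by name: the statement is the Claim_ definition above) =====
theorem solve_d13f3404_spec : Claim_equal_solve_d13f3404 := by
  intro grid _ _
  unfold Spec_solve_d13f3404
  exact solve_eq_alt grid
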